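-- pv_equiv track=rewrite | github.com/firedial/til | python/mahjong/remove.py | formRemovedPattern
-- ===== SOURCE A (Python) =====
-- def getNonZeroHai(pattern):
--     isNonZero = lambda hai: len(list(filter(lambda x: x < 0, hai))) == 0
--     return list(filter(isNonZero, pattern))
--
-- def formRemovedPattern(hai, form):
--     loopCount = len(hai) - len(form) + 1
--     pattern = []
--
--     for x in range(0, loopCount):
--         hai_ = hai[:]
--         for y, value in enumerate(form):
--             hai_[x + y] -= value
--         pattern.append(hai_)
--
--     return getNonZeroHai(pattern)
-- ===== SOURCE B (Python) =====
-- def formRemovedPattern(hai, form):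
--     # Single pass: validity-checked windows, building each kept pattern by
--     # slicing instead of copy-then-mutate; negative positions of hai are
--     # indexed once up front.
--     m = len(form)
--     negs = [i for i, v in enumerate(hai) if v < 0]
--     pattern = []
--     for x in range(len(hai) - m + 1):
--         if all(x <= i < x + m for i in negs) and \
--            all(hai[x + y] >= v for y, v in enumerate(form)):
--             pattern.append(hai[:x]
--                            + [hai[x + y] - v for y, v in enumerate(form)]
--                            + hai[x + m:])
--     return pattern
-- ===== Notes on version B (the rewrite author's own statement) =====
-- stated objective: alternative
-- what changed: Instead of materialising every shifted copy and then re-scanning each whole copy for negatives, B indexes the negative positions of hai once, tests each window's validity up front (negatives confined to the window and window values >= form), and builds only the kept patterns by slice concatenation.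
import Mathlib
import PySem

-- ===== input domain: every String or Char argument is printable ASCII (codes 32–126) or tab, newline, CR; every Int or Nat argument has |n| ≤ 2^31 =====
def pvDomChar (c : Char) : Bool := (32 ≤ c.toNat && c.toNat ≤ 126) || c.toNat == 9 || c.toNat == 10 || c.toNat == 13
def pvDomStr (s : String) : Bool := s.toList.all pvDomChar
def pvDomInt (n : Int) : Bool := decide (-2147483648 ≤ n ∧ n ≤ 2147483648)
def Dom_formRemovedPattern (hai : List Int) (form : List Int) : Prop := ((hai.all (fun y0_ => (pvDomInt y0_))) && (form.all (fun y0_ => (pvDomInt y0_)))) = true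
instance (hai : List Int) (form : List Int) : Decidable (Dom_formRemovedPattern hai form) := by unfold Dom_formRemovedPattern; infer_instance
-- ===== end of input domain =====

-- B replaces "materialise every shifted copy, then re-scan each copy for negatives"
-- by one validity-guarded pass that indexes hai's negative positions once and
-- builds only the kept patterns by slice concatenation (objective: alternative).

-- ===== PORT A =====
def getNonZeroHai (pattern : List (List Int)) : List (List Int) :=
  pattern.filter (fun h => (h.filter (fun v => decide (v < 0))).length == 0)

-- inner loop of A: 'for y, value in enumerate(form): hai_[x + y] -= value'
def pvSubAt (hai form : List Int) (x : Int) : List Int :=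
  (PySem.List.enumerate form).foldl
    (fun h yv => PySem.List.pySetD h (x + yv.1) (PySem.List.pyGetD h (x + yv.1) 0 - yv.2)) hai

def formRemovedPattern (hai : List Int) (form : List Int) : List (List Int) :=
  getNonZeroHai
    ((PySem.List.pyRange 0 ((hai.length : Int) - (form.length : Int) + 1) 1).foldl
      (fun pat x => pat ++ [pvSubAt hai form x]) [])

-- ===== PORT B =====
-- 'negs = [i for i, v in enumerate(hai) if v < 0]'
def pvNegs (hai : List Int) : List Int :=
  ((PySem.List.enumerate hai).filter (fun iv => decide (iv.2 < 0))).map (fun iv => iv.1)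

-- '[hai[x + y] - v for y, v in enumerate(form)]'
def pvDiffs (hai form : List Int) (x : Int) : List Int :=
  (PySem.List.enumerate form).map (fun yv => PySem.List.pyGetD hai (x + yv.1) 0 - yv.2)

def formRemovedPattern_alt (hai : List Int) (form : List Int) : List (List Int) :=
  (PySem.List.pyRange 0 ((hai.length : Int) - (form.length : Int) + 1) 1).foldl
    (fun pat x =>
      if ((pvNegs hai).all fun i => decide (x ≤ i) && decide (i < x + (form.length : Int))) &&
         ((PySem.List.enumerate form).all fun yv => decide (yv.2 ≤ PySem.List.pyGetD hai (x + yv.1) 0))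
      then pat ++ [PySem.List.slice hai none (some x) ++ pvDiffs hai form x
                     ++ PySem.List.slice hai (some (x + (form.length : Int))) none]
      else pat)
    []

-- ===== PRECONDITION & SPEC =====
def Spec_formRemovedPattern (hai : List Int) (form : List Int) (out : List (List Int)) : Prop := out = formRemovedPattern_alt hai form
instance (hai : List Int) (form : List Int) (out : List (List Int)) : Decidable (Spec_formRemovedPattern hai form out) := by unfold Spec_formRemovedPattern; infer_instance

-- ===== CLAIM (what is proved, stated in full; the proofs are below) =====
def Claim_equal_formRemovedPattern : Prop := ∀ (hai : List Int) (form : List Int), Dom_formRemovedPattern hai form → Spec_formRemovedPattern hai form (formRemovedPattern hai form)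

-- ===== LEMMAS AND PROOFS =====

theorem enumerate_shift {α : Type} (xs : List α) (s : Int) :
    PySem.List.enumerate xs (s + 1) = (PySem.List.enumerate xs s).map (fun p => (p.1 + 1, p.2)) := by
  induction xs generalizing s with
  | nil => simp [PySem.List.enumerate_nil]
  | cons x xs ih =>
    simp only [PySem.List.enumerate_cons, List.map_cons]
    exact congrArg _ (by rw [show s + 1 + 1 = (s + 1) + 1 from rfl, ih (s + 1)])

-- the inner mutation loop of A, characterised when the window fits exactly
theorem subGo (form : List Int) : ∀ (pre win suf : List Int), win.length = form.length →
    (PySem.List.enumerate form).foldl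
      (fun h yv => PySem.List.pySetD h ((pre.length : Int) + yv.1)
        (PySem.List.pyGetD h ((pre.length : Int) + yv.1) 0 - yv.2))
      (pre ++ win ++ suf)
    = pre ++ List.zipWith (fun a b => a - b) win form ++ suf := by
  induction form with
  | nil => intro pre win suf h; simp_all [PySem.List.enumerate_nil]
  | cons v fs ih =>
    intro pre win suf h
    cases win with
    | nil => simp at h
    | cons w ws =>
      have hlen : ws.length = fs.length := by simpa using h
      simp only [PySem.List.enumerate_cons, List.foldl_cons, add_zero]
      rw [List.append_assoc, List.cons_append]
      rw [show PySem.List.pyGetD (pre ++ w :: (ws ++ suf)) ((pre.length : Int)) 0 = w from by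
        simp]
      rw [show PySem.List.pySetD (pre ++ w :: (ws ++ suf)) ((pre.length : Int)) (w - v)
            = pre ++ (w - v) :: (ws ++ suf) from by simp [List.set_append_right]]
      rw [show (0 : Int) + 1 = 0 + 1 from rfl, enumerate_shift, List.foldl_map]
      have hfun : (fun (h' : List Int) (p : Int × Int) =>
            PySem.List.pySetD h' ((pre.length : Int) + (p.1 + 1))
              (PySem.List.pyGetD h' ((pre.length : Int) + (p.1 + 1)) 0 - p.2))
          = (fun h' p =>
            PySem.List.pySetD h' (((pre ++ [w - v]).length : Int) + p.1)
              (PySem.List.pyGetD h' (((pre ++ [w - v]).length : Int) + p.1) 0 - p.2)) := by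
        funext h' p
        rw [show ((pre.length : Int)) + (p.1 + 1) = (((pre ++ [w - v]).length : Int)) + p.1 from by
          simp [List.length_append]; ring]
      rw [hfun]
      have key := ih (pre ++ [w - v]) ws suf hlen
      rw [show (pre ++ [w - v]) ++ ws ++ suf = pre ++ (w - v) :: (ws ++ suf) from by simp] at key
      rw [key]
      simp [List.append_assoc]

theorem pvSubAt_eq (hai form : List Int) (k : Nat) (h : k + form.length ≤ hai.length) :
    pvSubAt hai form (k : Int)
      = hai.take k ++ List.zipWith (fun a b => a - b) ((hai.drop k).take form.length) form
          ++ hai.drop (k + form.length) := by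
  have hwin : ((hai.drop k).take form.length).length = form.length := by
    simp only [List.length_take, List.length_drop]; omega
  have h2 : (hai.drop k).take form.length ++ hai.drop (k + form.length) = hai.drop k := by
    have h3 := List.take_append_drop form.length (hai.drop k)
    rw [List.drop_drop] at h3
    exact h3
  have hsplit : hai.take k ++ (hai.drop k).take form.length ++ hai.drop (k + form.length) = hai := by
    rw [List.append_assoc, h2, List.take_append_drop]
  have hlen : (((hai.take k).length : Nat) : Int) = (k : Int) := by
    simp only [List.length_take]; omega
  have key := subGo form (hai.take k) ((hai.drop k).take form.length)
      (hai.drop (k + form.length)) hwin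
  rw [hsplit] at key
  simp only [hlen] at key
  unfold pvSubAt
  exact key

theorem getD_idx (l : List Int) (j : Nat) (hj : j < l.length) (d : Int) : l.getD j d = l[j] := by
  exact List.getD_eq_getElem l d hj

theorem pvDiffs_eq (hai form : List Int) (k : Nat) (h : k + form.length ≤ hai.length) :
    pvDiffs hai form (k : Int)
      = List.zipWith (fun a b => a - b) ((hai.drop k).take form.length) form := by
  apply List.ext_getElem
  · simp only [pvDiffs, List.length_map, PySem.List.length_enumerate, List.length_zipWith,
      List.length_take, List.length_drop]
    omega
  · intro i h1 h2
    have hi : i < form.length := by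
      simpa [pvDiffs] using h1
    simp only [pvDiffs, List.getElem_map, PySem.List.getElem_enumerate, List.getElem_zipWith,
      List.getElem_take, List.getElem_drop]
    rw [show (k : Int) + ((0 : Int) + (i : Int)) = ((k + i : Nat) : Int) from by push_cast; ring]
    rw [PySem.List.pyGetD_natCast, getD_idx hai (k + i) (by omega) 0]

-- B's negative-position guard, read off index-wise
theorem negs_all_iff (hai : List Int) (k m : Nat) :
    (((pvNegs hai).all
        (fun i => decide ((k : Int) ≤ i) && decide (i < (k : Int) + (m : Int)))) = true)
    ↔ ∀ (j : Nat), j < hai.length → hai.getD j 0 < 0 → (k ≤ j ∧ j < k + m) := by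
  simp only [pvNegs, List.all_eq_true, List.mem_map, List.mem_filter,
    PySem.List.mem_enumerate_iff, decide_eq_true_eq, Bool.and_eq_true]
  constructor
  · intro H j hj hneg
    have := H ((j : Int)) ⟨(0 + (j : Int), hai[j]), ⟨⟨j, hj, rfl⟩, by
      show hai[j] < 0
      rw [← getD_idx hai j hj 0]
      exact hneg⟩, by simp⟩
    omega
  · rintro H i ⟨a, ⟨⟨j, hj, rfl⟩, hneg⟩, rfl⟩
    have hneg' : hai[j] < 0 := hneg
    have := H j hj (by rw [getD_idx hai j hj 0]; exact hneg')
    show (k : Int) ≤ 0 + (j : Int) ∧ 0 + (j : Int) < (k : Int) + (m : Int)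
    omega

-- B's window-subtraction guard, read off index-wise
theorem form_all_iff (hai form : List Int) (k : Nat) (h : k + form.length ≤ hai.length) :
    ((PySem.List.enumerate form).all
        (fun yv => decide (yv.2 ≤ PySem.List.pyGetD hai ((k : Int) + yv.1) 0)) = true)
    ↔ ∀ (y : Nat), y < form.length → form.getD y 0 ≤ hai.getD (k + y) 0 := by
  simp only [List.all_eq_true, PySem.List.mem_enumerate_iff, decide_eq_true_eq]
  constructor
  · intro H y hy
    have h2 : (form[y] : Int) ≤ PySem.List.pyGetD hai ((k : Int) + (0 + (y : Int))) 0 :=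
      H (0 + (y : Int), form[y]) ⟨y, hy, rfl⟩
    rw [show (k : Int) + ((0 : Int) + (y : Int)) = ((k + y : Nat) : Int) from by push_cast; ring,
      PySem.List.pyGetD_natCast, getD_idx hai (k + y) (by omega) 0] at h2
    rw [getD_idx form y hy 0, getD_idx hai (k + y) (by omega) 0]
    exact h2
  · rintro H yv ⟨y, hy, rfl⟩
    show (form[y] : Int) ≤ PySem.List.pyGetD hai ((k : Int) + ((0 : Int) + (y : Int))) 0
    rw [show (k : Int) + ((0 : Int) + (y : Int)) = ((k + y : Nat) : Int) from by push_cast; ring,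
      PySem.List.pyGetD_natCast, getD_idx hai (k + y) (by omega) 0]
    have := H y hy
    rw [getD_idx form y hy 0, getD_idx hai (k + y) (by omega) 0] at this
    exact this

-- A's "no negative entry in the shifted copy" test, read off index-wise
theorem window_nonneg_iff (hai form : List Int) (k : Nat) (h : k + form.length ≤ hai.length) :
    ((((hai.take k ++ List.zipWith (fun a b => a - b) ((hai.drop k).take form.length) form
        ++ hai.drop (k + form.length)).filter (fun v => decide (v < 0))).length == 0) = true)
    ↔ ((∀ (j : Nat), j < hai.length → (j < k ∨ k + form.length ≤ j) → 0 ≤ hai.getD j 0)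
       ∧ (∀ (y : Nat), y < form.length → form.getD y 0 ≤ hai.getD (k + y) 0)) := by
  rw [beq_iff_eq, List.length_eq_zero_iff]
  simp only [List.filter_eq_nil_iff, List.mem_append, decide_eq_true_eq, not_lt]
  constructor
  · intro H
    refine ⟨?_, ?_⟩
    · intro j hj hcase
      rw [getD_idx hai j hj 0]
      rcases hcase with hcase | hcase
      · exact H hai[j] (Or.inl (Or.inl (List.mem_iff_getElem.mpr
          ⟨j, by rw [List.length_take]; omega, by rw [List.getElem_take]⟩)))
      · refine H hai[j] (Or.inr (List.mem_iff_getElem.mpr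
          ⟨j - (k + form.length), by rw [List.length_drop]; omega, ?_⟩))
        rw [List.getElem_drop]
        have hidx : k + form.length + (j - (k + form.length)) = j := by omega
        simp [hidx]
    · intro y hy
      rw [getD_idx form y hy 0, getD_idx hai (k + y) (by omega) 0]
      have := H (hai[k + y] - form[y]) (Or.inl (Or.inr (List.mem_iff_getElem.mpr
        ⟨y, by rw [List.length_zipWith, List.length_take, List.length_drop]; omega, by
          rw [List.getElem_zipWith, List.getElem_take, List.getElem_drop]⟩)))
      omega
  · rintro ⟨H1, H2⟩ a ha
    rcases ha with (ha | ha) | ha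
    · obtain ⟨j, hj, rfl⟩ := List.mem_iff_getElem.mp ha
      have hjk : j < k := by rw [List.length_take] at hj; omega
      rw [List.getElem_take]
      have := H1 j (by omega) (Or.inl hjk)
      rw [getD_idx hai j (by omega) 0] at this
      exact this
    · obtain ⟨y, hy, rfl⟩ := List.mem_iff_getElem.mp ha
      have hym : y < form.length := by
        rw [List.length_zipWith, List.length_take, List.length_drop] at hy; omega
      rw [List.getElem_zipWith, List.getElem_take, List.getElem_drop]
      have := H2 y hym
      rw [getD_idx form y hym 0, getD_idx hai (k + y) (by omega) 0] at this
      omega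
    · obtain ⟨j, hj, rfl⟩ := List.mem_iff_getElem.mp ha
      have hjn : j < hai.length - (k + form.length) := by rw [List.length_drop] at hj; omega
      rw [List.getElem_drop]
      have := H1 (k + form.length + j) (by omega) (Or.inr (by omega))
      rw [getD_idx hai (k + form.length + j) (by omega) 0] at this
      exact this

-- the "no negative entry in the shifted copy" test of A equals B's window guard
theorem pred_eq (hai form : List Int) (k : Nat) (h : k + form.length ≤ hai.length) :
    (((hai.take k ++ List.zipWith (fun a b => a - b) ((hai.drop k).take form.length) form
        ++ hai.drop (k + form.length)).filter (fun v => decide (v < 0))).length == 0)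
    = (((pvNegs hai).all
          (fun i => decide ((k : Int) ≤ i) && decide (i < (k : Int) + (form.length : Int))))
        && ((PySem.List.enumerate form).all
          (fun yv => decide (yv.2 ≤ PySem.List.pyGetD hai ((k : Int) + yv.1) 0)))) := by
  rw [Bool.eq_iff_iff]
  rw [window_nonneg_iff hai form k h, Bool.and_eq_true, negs_all_iff hai k form.length,
    form_all_iff hai form k h]
  constructor
  · rintro ⟨H1, H2⟩
    refine ⟨fun j hj hneg => ?_, H2⟩
    by_contra hc
    have := H1 j hj (by omega)
    have hneg' := hneg
    omega
  · rintro ⟨H1, H2⟩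
    refine ⟨fun j hj hcase => ?_, H2⟩
    by_contra hc
    have := H1 j hj (by omega)
    omega

theorem map_filter_congr {α β : Type} (l : List α) (p q : α → Bool) (f g : α → β)
    (h1 : ∀ x ∈ l, p x = q x) (h2 : ∀ x ∈ l, q x = true → f x = g x) :
    (l.filter p).map f = (l.filter q).map g := by
  induction l with
  | nil => rfl
  | cons a l ih =>
    simp only [List.filter_cons]
    rw [h1 a (by simp)]
    by_cases hq : q a = true
    · simp only [if_pos hq, List.map_cons]
      rw [h2 a (by simp) hq,
        ih (fun x hx => h1 x (by simp [hx])) (fun x hx => h2 x (by simp [hx]))]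
    · simp only [if_neg hq]
      exact ih (fun x hx => h1 x (by simp [hx])) (fun x hx => h2 x (by simp [hx]))

theorem formRemovedPattern_spec' (hai form : List Int) :
    formRemovedPattern hai form = formRemovedPattern_alt hai form := by
  unfold formRemovedPattern formRemovedPattern_alt getNonZeroHai
  rw [PySem.List.foldl_append_singleton_eq_map, PySem.List.foldl_append_if]
  simp only [List.nil_append]
  rw [List.filter_map]
  have hmem : ∀ x ∈ PySem.List.pyRange 0 ((hai.length : Int) - (form.length : Int) + 1) 1,
      ∃ k : Nat, x = (k : Int) ∧ k + form.length ≤ hai.length := by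
    intro x hx
    rw [PySem.List.mem_pyRange_one] at hx
    exact ⟨x.toNat, by omega, by omega⟩
  apply map_filter_congr
  · intro x hx
    obtain ⟨k, rfl, hk⟩ := hmem x hx
    show (((pvSubAt hai form (k : Int)).filter (fun v => decide (v < 0))).length == 0)
      = (((pvNegs hai).all
            (fun i => decide ((k : Int) ≤ i) && decide (i < (k : Int) + (form.length : Int))))
          && ((PySem.List.enumerate form).all
            (fun yv => decide (yv.2 ≤ PySem.List.pyGetD hai ((k : Int) + yv.1) 0))))
    rw [pvSubAt_eq hai form k hk]
    exact pred_eq hai form k hk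
  · intro x hx _
    obtain ⟨k, rfl, hk⟩ := hmem x hx
    show pvSubAt hai form (k : Int)
      = PySem.List.slice hai none (some (k : Int)) ++ pvDiffs hai form (k : Int)
          ++ PySem.List.slice hai (some ((k : Int) + (form.length : Int))) none
    rw [pvSubAt_eq hai form k hk, pvDiffs_eq hai form k hk, PySem.List.slice_to_natCast,
      show (k : Int) + (form.length : Int) = ((k + form.length : Nat) : Int) from by
        push_cast; ring,
      PySem.List.slice_from_natCast]

-- ===== VERDICT (by name: the statement is the Claim_ definition above) =====
theorem formRemovedPattern_spec : Claim_equal_formRemovedPattern := by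
  intro hai form _
  exact formRemovedPattern_spec' hai form
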